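-- pv_equiv track=rewrite | github.com/matthewjselby/advent_of_code | day12/part1.py | generate_perms
-- ===== SOURCE A (Python) =====
-- def generate_perms(pattern):
--     perms = []
--     if pattern[0] == '?':
--         perms = ['.', '#']
--     else:
--         perms = [pattern[0]]
--     for pattern_idx in range(1, len(pattern)):
--         if pattern[pattern_idx] == '?':
--             new_perms = []
--             for perm_idx in range(len(perms)):
--                 new_perms.append(perms[perm_idx] + '.')
--                 new_perms.append(perms[perm_idx] + '#')
--             perms = new_perms
--         else:
--             for perm_idx in range(len(perms)):
--                 perms[perm_idx] += pattern[pattern_idx]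
--     return perms
-- ===== SOURCE B (Python) =====
-- from itertools import product
--
--
-- def generate_perms(pattern):
--     if not pattern:
--         return ['']
--     options = [['.', '#'] if c == '?' else [c] for c in pattern]
--     return [''.join(choice) for choice in product(*options)]
-- ===== Notes on version B (the rewrite author's own statement) =====
-- stated objective: faster
-- what changed: Replaces the incremental Python-level perm-list doubling loop with a per-character options table fed to C-level itertools.product, joining each tuple once.
-- crash fix: On the empty pattern A raises IndexError (pattern[0]); B returns ['']. — e.g. on generate_perms(""): A raises IndexError, B returns [""]
import Mathlib
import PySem

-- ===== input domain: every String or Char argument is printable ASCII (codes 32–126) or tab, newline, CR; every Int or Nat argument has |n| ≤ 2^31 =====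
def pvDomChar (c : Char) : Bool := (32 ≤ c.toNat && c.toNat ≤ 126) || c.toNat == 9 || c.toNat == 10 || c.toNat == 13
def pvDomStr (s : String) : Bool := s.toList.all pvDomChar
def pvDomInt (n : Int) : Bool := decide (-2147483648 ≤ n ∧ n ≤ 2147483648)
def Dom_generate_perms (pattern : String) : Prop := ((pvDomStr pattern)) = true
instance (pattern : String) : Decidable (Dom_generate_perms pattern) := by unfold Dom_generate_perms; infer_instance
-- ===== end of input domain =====

-- B replaces A's incremental list-doubling loop with a per-character options table whose
-- cartesian product is joined once (idiomatic itertools.product style); same values, same order.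

-- ===== PORT A =====
-- Transliteration of A: seed perms from pattern[0], then for each later character either
-- double the list (appending '.' and '#' variants, in order) or extend every perm in place.
def generate_perms (pattern : String) : List String :=
  match pattern.toList with
  | [] => []  -- Python raises IndexError here (pattern[0]); excluded by Pre_generate_perms
  | c :: rest =>
    let perms : List String := if c = '?' then [".", "#"] else [String.ofList [c]]
    rest.foldl (fun perms ch =>
      if ch = '?' then
        perms.foldl (fun new_perms p => new_perms ++ [p ++ ".", p ++ "#"]) []
      else
        perms.map (fun p => p ++ String.ofList [ch])) perms

-- ===== PORT B =====
-- Transliteration of B: options table per character, then the cartesian product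
-- (itertools.product order: leftmost slot varies slowest), each choice joined to a string.
def generate_perms_alt (pattern : String) : List String :=
  match pattern.toList with
  | [] => [""]
  | _ :: _ =>
    let options : List (List Char) :=
      pattern.toList.map (fun c => if c = '?' then ['.', '#'] else [c])
    (options.foldr (fun opts acc => opts.flatMap (fun x => acc.map (fun t => x :: t))) [[]]).map
      (fun t => String.ofList t)

-- ===== PRECONDITION & SPEC =====
-- Pre_ excludes the empty pattern, on which A raises IndexError at pattern[0].
def Pre_generate_perms (pattern : String) : Prop := pattern ≠ ""
instance (pattern : String) : Decidable (Pre_generate_perms pattern) := by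
  unfold Pre_generate_perms; infer_instance

def pvWitness_generate_perms : String := "?a?"

-- On the empty pattern A raises IndexError (pattern[0]); B returns [''].
def Raises_generate_perms (pattern : String) : Prop := pattern = ""
instance (pattern : String) : Decidable (Raises_generate_perms pattern) := by
  unfold Raises_generate_perms; infer_instance
def pvRaiseWitness_generate_perms : String := ""
def pvRaiseWitnessOut_generate_perms : List String := [""]

def Spec_generate_perms (pattern : String) (out : List String) : Prop := out = generate_perms_alt pattern
instance (pattern : String) (out : List String) : Decidable (Spec_generate_perms pattern out) := by unfold Spec_generate_perms; infer_instance

-- ===== CLAIM (what is proved, stated in full; the proofs are below) =====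
def Claim_equal_generate_perms : Prop := ∀ (pattern : String), Dom_generate_perms pattern → Pre_generate_perms pattern → Spec_generate_perms pattern (generate_perms pattern)
def Claim_raises_generate_perms : Prop := (∀ (pattern : String), Dom_generate_perms pattern → Raises_generate_perms pattern → ¬ Pre_generate_perms pattern) ∧ (Dom_generate_perms (pvRaiseWitness_generate_perms) ∧ Raises_generate_perms (pvRaiseWitness_generate_perms) ∧ generate_perms_alt (pvRaiseWitness_generate_perms) = pvRaiseWitnessOut_generate_perms)

-- ===== LEMMAS AND PROOFS =====

-- B's product, as a direct recursion on the character list.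
def pvProd (cs : List Char) : List (List Char) :=
  match cs with
  | [] => [[]]
  | c :: cs =>
    (if c = '?' then ['.', '#'] else [c]).flatMap (fun x => (pvProd cs).map (fun t => x :: t))

theorem pvProd_eq_foldr (cs : List Char) :
    (cs.map (fun c => if c = '?' then ['.', '#'] else [c])).foldr
      (fun opts acc => opts.flatMap (fun x => acc.map (fun t => x :: t))) [[]] = pvProd cs := by
  induction cs with
  | nil => rfl
  | cons c cs ih => simp [pvProd, ih]

-- Reassociation of concatenation into ofList cons form.
theorem pv_dot_append (p : String) (t : List Char) :
    p ++ "." ++ String.ofList t = p ++ String.ofList ('.' :: t) := by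
  simp [String.ext_iff]

theorem pv_hash_append (p : String) (t : List Char) :
    p ++ "#" ++ String.ofList t = p ++ String.ofList ('#' :: t) := by
  simp [String.ext_iff]

theorem pv_dot_prepend (t : List Char) : "." ++ String.ofList t = String.ofList ('.' :: t) := by
  simp [String.ext_iff]

theorem pv_hash_prepend (t : List Char) : "#" ++ String.ofList t = String.ofList ('#' :: t) := by
  simp [String.ext_iff]

theorem pv_singleton_append (c : Char) (t : List Char) :
    String.ofList [c] ++ String.ofList t = String.ofList (c :: t) := by
  simp [String.ext_iff]

-- A's loop over the remaining characters computes, for each seed perm p in order,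
-- p followed by every product suffix of the rest, in product order.
theorem loopA_eq (rest : List Char) (ps : List String) :
    rest.foldl (fun perms ch =>
      if ch = '?' then
        perms.foldl (fun new_perms p => new_perms ++ [p ++ ".", p ++ "#"]) []
      else
        perms.map (fun p => p ++ String.ofList [ch])) ps
    = ps.flatMap (fun p => (pvProd rest).map (fun t => String.ofList (p.toList ++ t))) := by
  induction rest generalizing ps with
  | nil => simp [pvProd]
  | cons c cs ih =>
    simp only [List.foldl_cons]
    rw [ih]
    by_cases hc : c = '?'
    · subst hc
      rw [PySem.List.foldl_append_eq_flatMap]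
      simp [pvProd, List.flatMap_assoc, Function.comp_def, pv_dot_append, pv_hash_append]
    · simp only [if_neg hc, List.flatMap_map]
      simp [pvProd, hc, Function.comp_def]

-- ===== VERDICT (by name: the statement is the Claim_ definition above) =====
theorem generate_perms_spec : Claim_equal_generate_perms := by
  intro pattern _ hpre
  unfold Spec_generate_perms generate_perms generate_perms_alt
  cases h : pattern.toList with
  | nil =>
    exact absurd (by cases pattern; simp_all) hpre
  | cons c rest =>
    dsimp only
    rw [pvProd_eq_foldr, loopA_eq]
    by_cases hc : c = '?'
    · subst hc
      simp [pvProd, Function.comp_def, pv_dot_prepend, pv_hash_prepend]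
    · simp [pvProd, hc, Function.comp_def, pv_singleton_append]

theorem generate_perms_raises : Claim_raises_generate_perms := by
  unfold Claim_raises_generate_perms
  constructor
  · intro p _ hr
    unfold Raises_generate_perms at hr
    unfold Pre_generate_perms
    simp [hr]
  · exact ⟨by decide, by decide, by decide⟩

theorem generate_perms_raises_witness :
    generate_perms_alt pvRaiseWitness_generate_perms = pvRaiseWitnessOut_generate_perms :=
  generate_perms_raises.2.2.2
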